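-- pv_equiv track=rewrite | github.com/ReachGz/challenges | daily/d8_two_sum/solution.py | two_sum_dynamic
-- ===== SOURCE A (Python) =====
-- def two_sum_dynamic(a_list, k, n=2, i=None):
--     if k == 0:
--         return True
--
--     if i is None:
--         i = len(a_list) - 1
--
--     if n <= 0 or i < 0:
--         return False
--
--     include = two_sum_dynamic(a_list, k - a_list[i], n - 1, i - 1)
--     exclude = two_sum_dynamic(a_list, k, n, i - 1)
--
--     return include or exclude
-- ===== SOURCE B (Python) =====
-- def two_sum_dynamic(a_list, k, n=2, i=None):
--     if k == 0:
--         return True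
--
--     if i is None:
--         i = len(a_list) - 1
--
--     if n <= 0 or i < 0:
--         return False
--
--     # Bottom-up DP over the prefix a_list[:i+1]: the set of (sum, count)
--     # pairs reachable by subsequences with count <= n.
--     states = {(0, 0)}
--     for x in a_list[:i + 1]:
--         states |= {(s + x, c + 1) for (s, c) in states if c < n}
--     return any(s == k for (s, c) in states)
-- ===== Notes on version B (the rewrite author's own statement) =====
-- stated objective: alternative
-- what changed: Replaces the exponential top-down include/exclude recursion by a bottom-up dynamic program over the prefix that maintains the set of reachable (sum, count) pairs with count <= n, then tests membership of k.
import Mathlib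
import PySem

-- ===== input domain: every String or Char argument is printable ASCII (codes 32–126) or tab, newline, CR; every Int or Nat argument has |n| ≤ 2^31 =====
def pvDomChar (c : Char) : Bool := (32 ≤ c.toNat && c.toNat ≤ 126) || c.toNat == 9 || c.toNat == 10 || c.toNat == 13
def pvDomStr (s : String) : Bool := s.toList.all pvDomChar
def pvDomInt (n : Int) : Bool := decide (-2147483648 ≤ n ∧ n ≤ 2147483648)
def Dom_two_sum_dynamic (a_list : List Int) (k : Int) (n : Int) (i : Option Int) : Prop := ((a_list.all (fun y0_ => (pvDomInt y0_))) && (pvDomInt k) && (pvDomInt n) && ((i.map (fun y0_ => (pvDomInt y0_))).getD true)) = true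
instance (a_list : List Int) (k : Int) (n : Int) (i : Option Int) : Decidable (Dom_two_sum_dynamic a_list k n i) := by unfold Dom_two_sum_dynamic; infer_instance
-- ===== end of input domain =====

-- B replaces A's top-down include/exclude recursion by a bottom-up DP maintaining the set of reachable (sum, count) pairs (objective: alternative).


-- ===== PORT A =====
-- recursive core of A for a concrete index i (a_list[i] via pyGetD: Pre_ keeps the index in range, so no IndexError occurs)
def tsdGo (a_list : List Int) (k : Int) (n : Int) (i : Int) : Bool :=
  if k = 0 then true
  else if n ≤ 0 ∨ i < 0 then false
  else
    (tsdGo a_list (k - PySem.List.pyGetD a_list i 0) (n - 1) (i - 1)) ||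
    (tsdGo a_list k n (i - 1))
termination_by (i + 1).toNat
decreasing_by all_goals (simp_wf; omega)

def two_sum_dynamic (a_list : List Int) (k : Int) (n : Int) (i : Option Int) : Bool :=
  if k = 0 then true
  else tsdGo a_list k n (i.getD ((a_list.length : Int) - 1))

-- ===== PORT B =====
-- one loop iteration: states |= {(s + x, c + 1) for (s, c) in states if c < n}
def altStep (n : Int) (st : PySem.Set (Int × Int)) (x : Int) : PySem.Set (Int × Int) :=
  PySem.Set.update st ((st.filter (fun p => decide (p.2 < n))).map (fun p => (p.1 + x, p.2 + 1)))

def two_sum_dynamic_alt (a_list : List Int) (k : Int) (n : Int) (i : Option Int) : Bool :=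
  if k = 0 then true
  else
    let i' := i.getD ((a_list.length : Int) - 1)
    if n ≤ 0 ∨ i' < 0 then false
    else
      let states := (PySem.List.slice a_list none (some (i' + 1))).foldl (altStep n)
        (PySem.Set.ofList [((0 : Int), (0 : Int))])
      states.any (fun p => decide (p.1 = k))

-- ===== PRECONDITION & SPEC =====
-- Pre_ excludes exactly the inputs where A raises IndexError: an explicit index i ≥ len(a_list) reached with k ≠ 0 and n > 0.
def Pre_two_sum_dynamic (a_list : List Int) (k : Int) (n : Int) (i : Option Int) : Prop :=
  (i.all (fun j => decide (j < (a_list.length : Int)) || decide (k = 0) || decide (n ≤ 0))) = true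
instance (a_list : List Int) (k : Int) (n : Int) (i : Option Int) : Decidable (Pre_two_sum_dynamic a_list k n i) := by
  unfold Pre_two_sum_dynamic; infer_instance

def pvWitness_two_sum_dynamic : List Int × Int × Int × Option Int := ([1, 2, 3], 3, 2, none)

def Spec_two_sum_dynamic (a_list : List Int) (k : Int) (n : Int) (i : Option Int) (out : Bool) : Prop := out = two_sum_dynamic_alt a_list k n i
instance (a_list : List Int) (k : Int) (n : Int) (i : Option Int) (out : Bool) : Decidable (Spec_two_sum_dynamic a_list k n i out) := by unfold Spec_two_sum_dynamic; infer_instance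

-- ===== CLAIM (what is proved, stated in full; the proofs are below) =====
def Claim_equal_two_sum_dynamic : Prop := ∀ (a_list : List Int) (k : Int) (n : Int) (i : Option Int), Dom_two_sum_dynamic a_list k n i → Pre_two_sum_dynamic a_list k n i → Spec_two_sum_dynamic a_list k n i (two_sum_dynamic a_list k n i)

-- ===== LEMMAS AND PROOFS =====

-- A's recursion rewritten as structural recursion on the reversed prefix.
def hRec : Int → Int → List Int → Bool
  | k, _, [] => decide (k = 0)
  | k, n, x :: t => if k = 0 then true else if n ≤ 0 then false
      else hRec (k - x) (n - 1) t || hRec k n t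

theorem tsdGo_eq_hRec (a_list : List Int) : ∀ (m : Nat), m ≤ a_list.length → ∀ (k n : Int),
    tsdGo a_list k n ((m : Int) - 1) = hRec k n ((a_list.take m).reverse) := by
  intro m
  induction m with
  | zero =>
    intro _ k n
    rw [tsdGo]
    simp [hRec]
  | succ m ih =>
    intro hm k n
    have hm' : m < a_list.length := by omega
    have hx : PySem.List.pyGetD a_list ((m : Int) + 1 - 1) 0 = a_list[m] := by
      have : ((m : Int) + 1 - 1) = (m : Int) := by ring
      rw [this, PySem.List.pyGetD_natCast]
      simp [List.getD, hm']
    have htake : (a_list.take (m + 1)).reverse = a_list[m] :: (a_list.take m).reverse := by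
      rw [List.take_add_one]
      simp [hm']
    rw [tsdGo]
    push_cast
    rw [hx, htake, hRec]
    by_cases hk : k = 0
    · simp [hk]
    · by_cases hn : n ≤ 0
      · simp [hk, hn]
      · have h1 : ¬ (n ≤ 0 ∨ ((m : Int) + 1 - 1) < 0) := by omega
        rw [if_neg hk, if_neg h1, if_neg hk, if_neg hn]
        have e1 : ((m : Int) + 1 - 1 - 1) = (m : Int) - 1 := by ring
        rw [e1, ih (by omega), ih (by omega)]

theorem hRec_iff (l : List Int) : ∀ (k n : Int),
    hRec k n l = true ↔ (k = 0 ∨ ∃ m : List Int, m.Sublist l ∧ m ≠ [] ∧ (m.length : Int) ≤ n ∧ m.sum = k) := by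
  induction l with
  | nil =>
    intro k n
    simp [hRec]
  | cons x t ih =>
    intro k n
    by_cases hk : k = 0
    · simp [hRec, hk]
    · by_cases hn : n ≤ 0
      · simp only [hRec, if_neg hk, if_pos hn]
        constructor
        · intro h; exact absurd h (by simp)
        · rintro (h | ⟨m, _, hne, hlen, _⟩)
          · exact absurd h hk
          · have : 1 ≤ m.length := List.length_pos_iff.mpr hne
            omega
      · simp only [hRec, if_neg hk, if_neg hn, Bool.or_eq_true]
        rw [ih (k - x) (n - 1), ih k n]
        constructor
        · rintro (h | h)
          · rcases h with h0 | ⟨m, hsub, hne, hlen, hsum⟩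
            · right
              exact ⟨[x], by simp [List.sublist_cons_iff], by simp, by simpa using (by omega : (1:Int) ≤ n), by simp; omega⟩
            · right
              exact ⟨x :: m, List.sublist_cons_iff.mpr (Or.inr ⟨m, rfl, hsub⟩), by simp,
                by simp; omega, by simp; omega⟩
          · rcases h with h0 | ⟨m, hsub, hne, hlen, hsum⟩
            · exact absurd h0 hk
            · exact Or.inr ⟨m, List.sublist_cons_iff.mpr (Or.inl hsub), hne, hlen, hsum⟩
        · rintro (h0 | ⟨m, hsub, hne, hlen, hsum⟩)
          · exact absurd h0 hk
          · rcases List.sublist_cons_iff.mp hsub with hsub' | ⟨r, rfl, hr⟩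
            · exact Or.inr (Or.inr ⟨m, hsub', hne, hlen, hsum⟩)
            · rcases eq_or_ne r [] with rfl | hrne
              · exact Or.inl (Or.inl (by simp at hsum; omega))
              · refine Or.inl (Or.inr ⟨r, hr, hrne, ?_, ?_⟩)
                · simp at hlen; omega
                · simp at hsum; omega

theorem mem_altStep (n : Int) (st : PySem.Set (Int × Int)) (x : Int) (q : Int × Int) :
    q ∈ altStep n st x ↔ q ∈ st ∨ ∃ r ∈ st, r.2 < n ∧ q = (r.1 + x, r.2 + 1) := by
  unfold altStep
  rw [PySem.Set.mem_update]
  simp only [List.mem_map, List.mem_filter, decide_eq_true_eq]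
  constructor
  · rintro (h | ⟨p, ⟨hp, hlt⟩, rfl⟩)
    · exact Or.inl h
    · exact Or.inr ⟨p, hp, hlt, rfl⟩
  · rintro (h | ⟨r, hr, hlt, rfl⟩)
    · exact Or.inl h
    · exact Or.inr ⟨r, ⟨hr, hlt⟩, rfl⟩

theorem mem_foldl_altStep (n : Int) : ∀ (xs : List Int) (st : PySem.Set (Int × Int)) (p : Int × Int),
    p ∈ List.foldl (altStep n) st xs ↔
      ∃ q ∈ st, ∃ m : List Int, m.Sublist xs ∧ p.1 = q.1 + m.sum ∧ (p.2 : Int) = q.2 + (m.length : Int) ∧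
        (m = [] ∨ q.2 + (m.length : Int) ≤ n) := by
  intro xs
  induction xs with
  | nil =>
    intro st p
    constructor
    · intro h; exact ⟨p, h, [], by simp⟩
    · rintro ⟨q, hq, m, hsub, h1, h2, _⟩
      have : m = [] := List.sublist_nil.mp hsub
      subst this
      simp at h1 h2
      have : p = q := Prod.ext h1 h2
      simpa [this]
  | cons x xs ih =>
    intro st p
    simp only [List.foldl_cons]
    rw [ih]
    constructor
    · rintro ⟨q, hq, m, hsub, h1, h2, h3⟩
      rcases (mem_altStep n st x q).mp hq with hq' | ⟨r, hr, hlt, rfl⟩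
      · exact ⟨q, hq', m, List.sublist_cons_iff.mpr (Or.inl hsub), h1, h2, h3⟩
      · refine ⟨r, hr, x :: m, List.sublist_cons_iff.mpr (Or.inr ⟨m, rfl, hsub⟩), ?_, ?_, ?_⟩
        · simp at h1 ⊢; omega
        · simp at h2 ⊢; omega
        · right
          rcases h3 with rfl | h3
          · simp; omega
          · simp at h3 ⊢; omega
    · rintro ⟨q, hq, m, hsub, h1, h2, h3⟩
      rcases List.sublist_cons_iff.mp hsub with hsub' | ⟨r, rfl, hr⟩
      · exact ⟨q, (mem_altStep n st x q).mpr (Or.inl hq), m, hsub', h1, h2, h3⟩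
      · have hq2 : q.2 < n := by
          rcases h3 with h3 | h3
          · exact absurd h3 (by simp)
          · simp at h3; omega
        refine ⟨(q.1 + x, q.2 + 1), (mem_altStep n st x (q.1 + x, q.2 + 1)).mpr (Or.inr ⟨q, hq, hq2, rfl⟩),
          r, hr, ?_, ?_, ?_⟩
        · simp at h1 ⊢; omega
        · simp at h2 ⊢; omega
        · rcases eq_or_ne r [] with rfl | hrne
          · exact Or.inl rfl
          · right
            rcases h3 with h3 | h3
            · exact absurd h3 (by simp)
            · simp at h3 ⊢; omega

theorem alt_any_iff (k n : Int) (xs : List Int) (hk : k ≠ 0) :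
    ((xs.foldl (altStep n) (PySem.Set.ofList [((0 : Int), (0 : Int))])).any (fun p => decide (p.1 = k)) = true)
      ↔ ∃ m : List Int, m.Sublist xs ∧ m ≠ [] ∧ (m.length : Int) ≤ n ∧ m.sum = k := by
  rw [List.any_eq_true]
  constructor
  · rintro ⟨p, hp, hpk⟩
    simp only [decide_eq_true_eq] at hpk
    rcases (mem_foldl_altStep n xs _ p).mp hp with ⟨q, hq, m, hsub, h1, h2, h3⟩
    rw [PySem.Set.mem_ofList] at hq
    simp only [List.mem_singleton] at hq
    subst hq
    rcases eq_or_ne m [] with rfl | hne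
    · simp at h1; exact absurd (by omega : k = 0) hk
    · refine ⟨m, hsub, hne, ?_, by omega⟩
      rcases h3 with h3 | h3
      · exact absurd h3 hne
      · simpa using h3
  · rintro ⟨m, hsub, hne, hlen, hsum⟩
    refine ⟨(m.sum, (m.length : Int)), ?_, by simp [hsum]⟩
    exact (mem_foldl_altStep n xs _ _).mpr ⟨(0, 0), by simp [PySem.Set.mem_ofList], m, hsub,
      by simp, by simp, Or.inr (by simpa using hlen)⟩

theorem reverse_exists (l : List Int) (n k : Int) :
    (∃ m : List Int, m.Sublist l.reverse ∧ m ≠ [] ∧ (m.length : Int) ≤ n ∧ m.sum = k)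
      ↔ ∃ m : List Int, m.Sublist l ∧ m ≠ [] ∧ (m.length : Int) ≤ n ∧ m.sum = k := by
  constructor
  · rintro ⟨m, hsub, hne, hlen, hsum⟩
    refine ⟨m.reverse, ?_, by simpa, by simpa, by simpa⟩
    have := List.reverse_sublist.mpr hsub
    simpa using this
  · rintro ⟨m, hsub, hne, hlen, hsum⟩
    refine ⟨m.reverse, ?_, by simpa, by simpa, by simpa⟩
    exact List.reverse_sublist.mpr (by simpa using hsub)

-- ===== VERDICT (by name: the statement is the Claim_ definition above) =====
theorem two_sum_dynamic_spec : Claim_equal_two_sum_dynamic := by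
  intro a_list k n i _ hPre
  unfold Spec_two_sum_dynamic two_sum_dynamic two_sum_dynamic_alt
  by_cases hk : k = 0
  · simp [hk]
  · simp only [if_neg hk]
    set i' : Int := i.getD ((a_list.length : Int) - 1) with hi'
    by_cases hni : n ≤ 0 ∨ i' < 0
    · rw [if_pos hni, tsdGo]
      rcases hni with h | h <;> simp [hk, h]
    · rw [if_neg hni]
      have hn : 0 < n := by omega
      have hi0 : 0 ≤ i' := by omega
      have hilt : i' < (a_list.length : Int) := by
        unfold Pre_two_sum_dynamic at hPre
        cases i with
        | none => simp only [hi', Option.getD_none]; omega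
        | some j =>
          simp only [Option.all_some, Bool.or_eq_true, decide_eq_true_eq] at hPre
          rcases hPre with (h | h) | h
          · simpa [hi'] using h
          · exact absurd h hk
          · omega
      have hmle : (i' + 1).toNat ≤ a_list.length := by omega
      have key := tsdGo_eq_hRec a_list (i' + 1).toNat hmle k n
      have hm : (((i' + 1).toNat : Int)) - 1 = i' := by omega
      rw [hm] at key
      rw [key, Bool.eq_iff_iff, hRec_iff]
      have hsl : PySem.List.slice a_list none (some (i' + 1)) = a_list.take (i' + 1).toNat :=
        PySem.List.slice_to a_list (by omega)
      rw [hsl]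
      rw [alt_any_iff k n _ hk]
      rw [reverse_exists]
      constructor
      · rintro (h0 | h)
        · exact absurd h0 hk
        · exact h
      · exact Or.inr
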